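-- pv_equiv track=rewrite | github.com/kimtongdak/NemoNemo | Main_NemoNemo.py | status_update
-- ===== SOURCE A (Python) =====
-- def status_update(row_num,column_num,row_status_temp_list,column_status_temp_list):
--     row_status_list = [[]*1 for _ in range(row_num)] # checked 99 , marked 0
--     column_status_list = [[]*1 for _ in range(column_num)] # 이놈은 체크된거 1로
--     for i in range(row_num):
--         row_status_index = 0
--         for j in range(column_num):
--             if row_status_temp_list[i][j] == '□': # 비어있으면
--                 row_status_index += 1
--             elif row_status_temp_list[i][j] == 'X':
--                 if row_status_index == 0: # 초장부터 marked면 1만 넣어야됨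
--                     row_status_list[i].append('0')
--                     row_status_index = 0
--                 else:
--                     row_status_list[i].append(f'{row_status_index}')
--                     row_status_list[i].append('0')
--                     row_status_index = 0
--             elif row_status_temp_list[i][j] == '■':
--                 if row_status_index == 0: # 초장부터 checked면 1만 넣어야됨
--                     row_status_list[i].append('99')
--                     row_status_index = 0
--                 else:
--                     row_status_list[i].append(f'{row_status_index}')
--                     row_status_list[i].append('99')
--                     row_status_index = 0
--         if row_status_index == 0: # 마지막값이 0이면 추가할 필요 없음 ( 마지막 print로 확인하면 안나온 이유가 continue되서 출력을 안함 )
--             pass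
--         else:
--             row_status_list[i].append(f'{row_status_index}')
--
--     for i in range(column_num):
--         column_status_index = 0
--         for j in range(row_num):
--             if column_status_temp_list[i][j] == '□': # 비어있으면
--                 column_status_index += 1
--             elif column_status_temp_list[i][j] == 'X':
--                 if column_status_index == 0: # 초장부터 checked or marked면 1만 넣어야됨
--                     column_status_list[i].append('0')
--                     column_status_index = 0
--                 else:
--                     column_status_list[i].append(f'{column_status_index}')
--                     column_status_list[i].append('0')
--                     column_status_index = 0
--             elif column_status_temp_list[i][j] == '■':
--                 if column_status_index == 0: # 초장부터 checked or marked면 1만 넣어야됨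
--                     column_status_list[i].append('99')
--                     column_status_index = 0
--                 else:
--                     column_status_list[i].append(f'{column_status_index}')
--                     column_status_list[i].append('99')
--                     column_status_index = 0
--         if column_status_index == 0: # 마지막값이 0이면 추가할 필요 없음 ( 마지막 print로 확인하면 안나온 이유가 continue되서 출력을 안함 )
--             pass
--         else:
--             column_status_list[i].append(f'{column_status_index}')
--
--     return row_status_list, column_status_list
-- ===== SOURCE B (Python) =====
-- def _encode(cells):
--     # keep only meaningful symbols, then walk maximal runs
--     cells = [c for c in cells if c in ('\u25a1', 'X', '\u25a0')]
--     out = []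
--     i = 0
--     n = len(cells)
--     while i < n:
--         if cells[i] == '\u25a1':
--             j = i
--             while j < n and cells[j] == '\u25a1':
--                 j += 1
--             out.append(str(j - i))
--             i = j
--         else:
--             out.append('0' if cells[i] == 'X' else '99')
--             i += 1
--     return out
--
-- def status_update(row_num, column_num, row_status_temp_list, column_status_temp_list):
--     rows = [_encode([row_status_temp_list[i][j] for j in range(column_num)])
--             for i in range(row_num)]
--     cols = [_encode([column_status_temp_list[i][j] for j in range(row_num)])
--             for i in range(column_num)]
--     return rows, cols
-- ===== Notes on version B (the rewrite author's own statement) =====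
-- stated objective: simpler
-- what changed: Replaces A's duplicated row/column blocks and per-cell empty-counter state machine with one shared helper that filters a line to its meaningful symbols and walks maximal runs (one token per blank run, one marker per cell), applied to rows and columns via comprehensions.
import Mathlib
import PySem

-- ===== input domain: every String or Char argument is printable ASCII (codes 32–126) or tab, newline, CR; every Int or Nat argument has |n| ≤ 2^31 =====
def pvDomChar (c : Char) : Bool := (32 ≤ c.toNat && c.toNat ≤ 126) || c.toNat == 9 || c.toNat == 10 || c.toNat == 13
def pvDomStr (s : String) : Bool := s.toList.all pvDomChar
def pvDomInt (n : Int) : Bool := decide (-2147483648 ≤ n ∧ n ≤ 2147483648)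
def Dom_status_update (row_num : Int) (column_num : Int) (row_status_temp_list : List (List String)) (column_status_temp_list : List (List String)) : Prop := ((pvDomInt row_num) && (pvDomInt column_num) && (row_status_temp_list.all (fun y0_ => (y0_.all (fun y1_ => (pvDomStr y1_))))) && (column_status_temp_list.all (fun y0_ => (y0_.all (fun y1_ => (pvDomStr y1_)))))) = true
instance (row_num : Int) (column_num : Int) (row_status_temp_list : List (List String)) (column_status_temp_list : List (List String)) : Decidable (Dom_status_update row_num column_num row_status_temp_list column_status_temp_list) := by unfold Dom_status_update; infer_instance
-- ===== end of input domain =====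

-- B replaces A's duplicated per-cell counter loops with one run-based helper applied to rows and columns alike (objective: simpler).

-- ===== PORT A =====
-- A's per-cell step: state = (emitted tokens so far, pending count of '□' cells)
def pvStepA (line : List String) (st : List String × Int) (j : Int) : List String × Int :=
  let c := PySem.List.pyGetD line j ""
  if c = "□" then (st.1, st.2 + 1)
  else if c = "X" then
    if st.2 = 0 then (st.1 ++ ["0"], (0 : Int))
    else (st.1 ++ [PySem.Int.toStr st.2, "0"], (0 : Int))
  else if c = "■" then
    if st.2 = 0 then (st.1 ++ ["99"], (0 : Int))
    else (st.1 ++ [PySem.Int.toStr st.2, "99"], (0 : Int))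
  else st

-- A's inner loop over j in range(innerN) plus the trailing-count flush
def pvLineA (temp : List (List String)) (innerN : Int) (i : Int) : List String :=
  let st := (PySem.List.pyRange 0 innerN 1).foldl
      (pvStepA (PySem.List.pyGetD temp i [])) ([], 0)
  if st.2 = 0 then st.1 else st.1 ++ [PySem.Int.toStr st.2]

def status_update (row_num : Int) (column_num : Int) (row_status_temp_list : List (List String)) (column_status_temp_list : List (List String)) : List (List String) × List (List String) :=
  ((PySem.List.pyRange 0 row_num 1).map (pvLineA row_status_temp_list column_num),
   (PySem.List.pyRange 0 column_num 1).map (pvLineA column_status_temp_list row_num))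

-- ===== PORT B =====
def pvKeep (c : String) : Bool := c = "□" || c = "X" || c = "■"

-- B's run walk over the filtered cells (the while loops become run-at-a-time recursion;
-- the fuel argument only makes the recursion structural, it never runs out)
def pvRunsF : Nat → List String → List String
  | _, [] => []
  | 0, _ :: _ => []
  | fuel + 1, c :: rest =>
    if c = "□" then
      PySem.Int.toStr (1 + ((rest.takeWhile (fun x => x == "□")).length : Int))
        :: pvRunsF fuel (rest.dropWhile (fun x => x == "□"))
    else (if c = "X" then "0" else "99") :: pvRunsF fuel rest

def pvRuns (l : List String) : List String := pvRunsF l.length l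

def pvEncode (cells : List String) : List String := pvRuns (cells.filter pvKeep)

-- B gathers a line's first innerN cells exactly as its comprehension does, then encodes the runs
def pvGather (temp : List (List String)) (innerN : Int) (i : Int) : List String :=
  (PySem.List.pyRange 0 innerN 1).map
    (fun j => PySem.List.pyGetD (PySem.List.pyGetD temp i []) j "")

def status_update_alt (row_num : Int) (column_num : Int) (row_status_temp_list : List (List String)) (column_status_temp_list : List (List String)) : List (List String) × List (List String) :=
  ((PySem.List.pyRange 0 row_num 1).map (fun i => pvEncode (pvGather row_status_temp_list column_num i)),
   (PySem.List.pyRange 0 column_num 1).map (fun i => pvEncode (pvGather column_status_temp_list row_num i)))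

-- ===== PRECONDITION & SPEC =====
-- Pre_ excludes exactly the inputs on which A raises IndexError (a positive dimension with too few
-- rows/columns or a too-short line); B raises there as well.
def Pre_status_update (row_num : Int) (column_num : Int) (row_status_temp_list : List (List String)) (column_status_temp_list : List (List String)) : Prop :=
  (0 < column_num → row_num ≤ (row_status_temp_list.length : Int) ∧
    ∀ r ∈ row_status_temp_list.take row_num.toNat, column_num ≤ (r.length : Int)) ∧
  (0 < row_num → column_num ≤ (column_status_temp_list.length : Int) ∧
    ∀ c ∈ column_status_temp_list.take column_num.toNat, row_num ≤ (c.length : Int))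
instance (row_num : Int) (column_num : Int) (row_status_temp_list : List (List String)) (column_status_temp_list : List (List String)) : Decidable (Pre_status_update row_num column_num row_status_temp_list column_status_temp_list) := by unfold Pre_status_update; infer_instance

def pvWitness_status_update : Int × Int × List (List String) × List (List String) :=
  (1, 2, [["X", "."]], [["X"], ["."]])

def Spec_status_update (row_num : Int) (column_num : Int) (row_status_temp_list : List (List String)) (column_status_temp_list : List (List String)) (out : List (List String) × List (List String)) : Prop := out = status_update_alt row_num column_num row_status_temp_list column_status_temp_list
instance (row_num : Int) (column_num : Int) (row_status_temp_list : List (List String)) (column_status_temp_list : List (List String)) (out : List (List String) × List (List String)) : Decidable (Spec_status_update row_num column_num row_status_temp_list column_status_temp_list out) := by unfold Spec_status_update; infer_instance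

-- ===== CLAIM (what is proved, stated in full; the proofs are below) =====
def Claim_equal_status_update : Prop := ∀ (row_num : Int) (column_num : Int) (row_status_temp_list : List (List String)) (column_status_temp_list : List (List String)), Dom_status_update row_num column_num row_status_temp_list column_status_temp_list → Pre_status_update row_num column_num row_status_temp_list column_status_temp_list → Spec_status_update row_num column_num row_status_temp_list column_status_temp_list (status_update row_num column_num row_status_temp_list column_status_temp_list)

-- ===== LEMMAS AND PROOFS =====

theorem pvRunsF_fuel : ∀ (f1 : Nat) (l : List String) (f2 : Nat),
    l.length ≤ f1 → l.length ≤ f2 → pvRunsF f1 l = pvRunsF f2 l := by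
  intro f1
  induction f1 with
  | zero =>
    intro l f2 h1 _
    match l, f2 with
    | [], 0 => rfl
    | [], _ + 1 => rfl
    | _ :: _, _ => simp at h1
  | succ n ih =>
    intro l f2 h1 h2
    match l, f2 with
    | [], 0 => rfl
    | [], _ + 1 => rfl
    | c :: rest, 0 => simp at h2
    | c :: rest, m + 1 =>
      simp only [pvRunsF]
      have hd := List.length_dropWhile_le (fun x => x == "□") rest
      simp only [List.length_cons] at h1 h2
      rw [ih (rest.dropWhile (fun x => x == "□")) m (by omega) (by omega),
        ih rest m (by omega) (by omega)]

theorem pvRuns_nil : pvRuns [] = [] := rfl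

theorem pvRuns_cons (c : String) (rest : List String) :
    pvRuns (c :: rest) =
      if c = "□" then
        PySem.Int.toStr (1 + ((rest.takeWhile (fun x => x == "□")).length : Int))
          :: pvRuns (rest.dropWhile (fun x => x == "□"))
      else (if c = "X" then "0" else "99") :: pvRuns rest := by
  have hd := List.length_dropWhile_le (fun x => x == "□") rest
  rw [pvRuns, List.length_cons, pvRunsF]
  rw [pvRunsF_fuel rest.length (rest.dropWhile (fun x => x == "□"))
      (rest.dropWhile (fun x => x == "□")).length (by omega) le_rfl]
  rfl

theorem pv_takeWhile_rep (m : Nat) :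
    (List.replicate m "□").takeWhile (fun x => x == "□") = List.replicate m "□" := by
  induction m with
  | zero => simp
  | succ n ih => simp [List.replicate_succ, List.takeWhile_cons, ih]

theorem pv_span_rep (m : Nat) (c : String) (l : List String) (hc : c ≠ "□") :
    (List.replicate m "□" ++ c :: l).takeWhile (fun x => x == "□") = List.replicate m "□" ∧
    (List.replicate m "□" ++ c :: l).dropWhile (fun x => x == "□") = c :: l := by
  induction m with
  | zero => simp [List.takeWhile_cons, List.dropWhile_cons, hc]
  | succ n ih => simpa [List.replicate_succ, List.takeWhile_cons, List.dropWhile_cons] using ih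

theorem pv_runs_rep (k : Int) (hk : 0 ≤ k) :
    pvRuns (List.replicate k.toNat "□") = if k = 0 then [] else [PySem.Int.toStr k] := by
  by_cases h0 : k = 0
  · simp [h0, pvRuns_nil]
  · have hpos : 0 < k.toNat := by omega
    obtain ⟨m, hm⟩ : ∃ m, k.toNat = m + 1 := ⟨k.toNat - 1, by omega⟩
    rw [hm, List.replicate_succ, pvRuns_cons]
    simp [pv_takeWhile_rep m, pvRuns_nil]
    rw [if_neg h0]
    have h1m : 1 + (m : Int) = k := by omega
    rw [h1m]

theorem pv_runs_rep_cons (k : Int) (hk : 0 ≤ k) (c : String) (l : List String) (hc : c ≠ "□") :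
    pvRuns (List.replicate k.toNat "□" ++ c :: l) =
      (if k = 0 then [] else [PySem.Int.toStr k]) ++ pvRuns (c :: l) := by
  by_cases h0 : k = 0
  · simp [h0]
  · have hpos : 0 < k.toNat := by omega
    obtain ⟨m, hm⟩ : ∃ m, k.toNat = m + 1 := ⟨k.toNat - 1, by omega⟩
    rw [hm, List.replicate_succ, List.cons_append, pvRuns_cons]
    obtain ⟨ht, hd⟩ := pv_span_rep m c l hc
    simp [ht, hd, h0]
    congr 1; omega

-- the invariant of A's inner loop, stated against B's run walk
theorem pv_foldA (cells : List String) : ∀ (acc : List String) (k : Int), 0 ≤ k →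
    (let st := cells.foldl (fun st c =>
        if c = "□" then (st.1, st.2 + 1)
        else if c = "X" then
          if st.2 = 0 then (st.1 ++ ["0"], (0 : Int)) else (st.1 ++ [PySem.Int.toStr st.2, "0"], (0 : Int))
        else if c = "■" then
          if st.2 = 0 then (st.1 ++ ["99"], (0 : Int)) else (st.1 ++ [PySem.Int.toStr st.2, "99"], (0 : Int))
        else st) (acc, k)
     if st.2 = 0 then st.1 else st.1 ++ [PySem.Int.toStr st.2]) =
    acc ++ pvRuns (List.replicate k.toNat "□" ++ cells.filter pvKeep) := by
  induction cells with
  | nil =>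
    intro acc k hk
    simp [pv_runs_rep k hk]
    split <;> simp_all
  | cons c rest ih =>
    intro acc k hk
    by_cases h1 : c = "□"
    · have : (k + 1).toNat = k.toNat + 1 := by omega
      simpa [h1, List.filter_cons, pvKeep, this, List.replicate_succ'] using
        ih acc (k + 1) (by omega)
    · by_cases h2 : c = "X"
      · have hrec := ih (acc ++ (if k = 0 then [] else [PySem.Int.toStr k]) ++ ["0"]) 0 le_rfl
        simp only [Int.toNat_zero, List.replicate_zero, List.nil_append] at hrec
        have hruns := pv_runs_rep_cons k hk "X" (rest.filter pvKeep) (by decide)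
        rw [pvRuns_cons] at hruns
        simp only [show ("X" : String) ≠ "□" by decide, if_false, if_pos rfl] at hruns
        by_cases h0 : k = 0 <;>
          simp_all [List.filter_cons, pvKeep, List.append_assoc]
      · by_cases h3 : c = "■"
        · have hrec := ih (acc ++ (if k = 0 then [] else [PySem.Int.toStr k]) ++ ["99"]) 0 le_rfl
          simp only [Int.toNat_zero, List.replicate_zero, List.nil_append] at hrec
          have hruns := pv_runs_rep_cons k hk "■" (rest.filter pvKeep) (by decide)
          rw [pvRuns_cons] at hruns
          simp only [show ("■" : String) ≠ "□" by decide, if_false,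
            show ("■" : String) ≠ "X" by decide] at hruns
          by_cases h0 : k = 0 <;>
            simp_all [List.filter_cons, pvKeep, List.append_assoc]
        · have hkeep : pvKeep c = false := by simp [pvKeep, h1, h2, h3]
          simpa [h1, h2, h3, List.filter_cons, hkeep] using ih acc k hk

-- A's whole inner loop = B's encode of the gathered line
theorem pv_line_eq (temp : List (List String)) (n i : Int)
    (hlen : 0 < n → n ≤ ((PySem.List.pyGetD temp i ([] : List String)).length : Int)) :
    pvLineA temp n i = pvEncode (pvGather temp n i) := by
  set line := PySem.List.pyGetD temp i ([] : List String) with hline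
  by_cases hn : 0 < n
  case neg =>
    rw [pvLineA, pvGather, PySem.List.pyRange_one_eq_nil (by omega)]
    simp [pvEncode, pvRuns_nil]
  have hlen' := hlen hn
  have hlt : (line.take n.toNat).length = n.toNat := by simp; omega
  have hgather : pvGather temp n i = line.take n.toNat := by
    have key : ∀ cells : List String, cells = line.take n.toNat →
        pvGather temp n i = cells := by
      intro cells hc
      have hclen : (cells.length : Int) = n := by rw [hc, hlt]; omega
      have hlen3 : PySem.List.len cells = n := by simpa [PySem.List.len] using hclen
      rw [pvGather, ← hline, ← hlen3]
      rw [List.map_congr_left (g := fun j => PySem.List.pyGetD cells j "") ?_]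
      · exact PySem.List.map_pyGetD_pyRange_zero cells ""
      · intro j hj
        rw [PySem.List.mem_pyRange_one] at hj
        have hjn : j < n := by rw [hlen3] at hj; omega
        have hget : PySem.List.pyGetD cells j "" = PySem.List.pyGetD line j "" := by
          rw [PySem.List.pyGetD_eq_getElem cells "" hj.1 (by omega),
            PySem.List.pyGetD_eq_getElem line "" hj.1 (by omega)]
          simp [hc]
        simpa using hget.symm
    exact key _ rfl
  have hfold : ∀ cells : List String, cells = line.take n.toNat →
      (PySem.List.pyRange 0 n 1).foldl (pvStepA line) ([], 0) =
      cells.foldl (fun st c =>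
        if c = "□" then (st.1, st.2 + 1)
        else if c = "X" then
          if st.2 = 0 then (st.1 ++ ["0"], (0 : Int)) else (st.1 ++ [PySem.Int.toStr st.2, "0"], (0 : Int))
        else if c = "■" then
          if st.2 = 0 then (st.1 ++ ["99"], (0 : Int)) else (st.1 ++ [PySem.Int.toStr st.2, "99"], (0 : Int))
        else st) ([], 0) := by
    intro cells hc
    have hclen : (cells.length : Int) = n := by rw [hc, hlt]; omega
    have hlen3 : PySem.List.len cells = n := by simpa [PySem.List.len] using hclen
    rw [← hlen3]
    rw [PySem.List.foldl_congr_mem (PySem.List.pyRange 0 (PySem.List.len cells) 1)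
      (pvStepA line)
      (fun acc j => (fun st c =>
        if c = "□" then (st.1, st.2 + 1)
        else if c = "X" then
          if st.2 = 0 then (st.1 ++ ["0"], (0 : Int)) else (st.1 ++ [PySem.Int.toStr st.2, "0"], (0 : Int))
        else if c = "■" then
          if st.2 = 0 then (st.1 ++ ["99"], (0 : Int)) else (st.1 ++ [PySem.Int.toStr st.2, "99"], (0 : Int))
        else st) acc (PySem.List.pyGetD cells j "")) ([], 0) ?_]
    · exact PySem.List.foldl_pyRange_zero_pyGetD cells ""
        (fun (st : List String × Int) (c : String) =>
          if c = "□" then (st.1, st.2 + 1)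
          else if c = "X" then
            if st.2 = 0 then (st.1 ++ ["0"], (0 : Int)) else (st.1 ++ [PySem.Int.toStr st.2, "0"], (0 : Int))
          else if c = "■" then
            if st.2 = 0 then (st.1 ++ ["99"], (0 : Int)) else (st.1 ++ [PySem.Int.toStr st.2, "99"], (0 : Int))
          else st) ([], (0 : Int))
    · intro acc j hj
      rw [PySem.List.mem_pyRange_one] at hj
      have hjn : j < n := by rw [hlen3] at hj; omega
      have hget : PySem.List.pyGetD cells j "" = PySem.List.pyGetD line j "" := by
        rw [PySem.List.pyGetD_eq_getElem cells "" hj.1 (by omega),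
          PySem.List.pyGetD_eq_getElem line "" hj.1 (by omega)]
        simp [hc]
      simp only [pvStepA, hget]
  have hf := hfold (line.take n.toNat) rfl
  rw [pvLineA, hf, pvEncode, hgather]
  simpa using pv_foldA (line.take n.toNat) [] 0 le_rfl

-- ===== VERDICT (by name: the statement is the Claim_ definition above) =====
theorem status_update_spec : Claim_equal_status_update := by
  intro rn cn rl cl _hD hPre
  obtain ⟨hrow, hcol⟩ := hPre
  unfold Spec_status_update status_update status_update_alt
  refine Prod.ext ?_ ?_ <;> simp only
  · apply List.map_congr_left
    intro i hi
    rw [PySem.List.mem_pyRange_one] at hi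
    apply pv_line_eq rl cn i
    intro hcn
    obtain ⟨hrl, hrows⟩ := hrow hcn
    have : PySem.List.pyGetD rl i ([] : List String) = rl[i.toNat] :=
      PySem.List.pyGetD_eq_getElem rl ([] : List String) hi.1 (by omega)
    rw [this]
    exact hrows _ (by
      have : rl[i.toNat] = (rl.take rn.toNat)[i.toNat]'(by simp; omega) := by
        simp [List.getElem_take]
      rw [this]; exact List.getElem_mem _)
  · apply List.map_congr_left
    intro i hi
    rw [PySem.List.mem_pyRange_one] at hi
    apply pv_line_eq cl rn i
    intro hrn
    obtain ⟨hcl, hcols⟩ := hcol hrn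
    have : PySem.List.pyGetD cl i ([] : List String) = cl[i.toNat] :=
      PySem.List.pyGetD_eq_getElem cl ([] : List String) hi.1 (by omega)
    rw [this]
    exact hcols _ (by
      have : cl[i.toNat] = (cl.take cn.toNat)[i.toNat]'(by simp; omega) := by
        simp [List.getElem_take]
      rw [this]; exact List.getElem_mem _)
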